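-- pv_equiv track=rewrite | github.com/981377660LMT/algorithm-study | 19_数学/floorSum.py | modSum
-- ===== SOURCE A (Python) =====
-- def modSum(n: int, k: int) -> int:
--     """
--     余数求和(ModSum/remainderSum)
--     ∑k%i (i in [1,n]), 即 sum(k%i for i in [1,n])
--     = ∑k-(k/i)*i
--     = n*k-∑(k/i)*i
--     对于 [l,r] 范围内的 i,k/i 不变，此时 ∑(k/i)*i = (k/i)*∑i = (k/i)*(l+r)*(r-l+1)/2
--     """
--
--     def min(a, b):
--         return a if a < b else b
--
--     res = n * k
--     left, right = 1, 0
--     while left <= n: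
--         h = k // left
--         if h > 0:
--             right = min(k // h, n)
--         else:
--             right = n
--         w = right - left + 1
--         s = (left + right) * w // 2
--         res -= h * s
--         left = right + 1
--     return res
-- ===== SOURCE B (Python) =====
-- def _qsum(m, K):
--     # sum of i * (K // i) for i in 1..m (K >= 0, m >= 1), by counting the
--     # lattice points under the hyperbola i*j <= K with weight i: split the
--     # pairs at j <= s versus i <= s, where s = isqrt(K).
--     s = 0
--     while (s + 1) * (s + 1) <= K:
--         s += 1
--     total = 0
--     for j in range(1, s + 1):
--         t = min(m, K // j)
--         total += t * (t + 1) // 2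
--     for i in range(1, min(m, s) + 1):
--         total += i * (K // i - s)
--     return total
--
--
-- def modSum(n: int, k: int) -> int:
--     # sum(k % i for i in [1, n]) = n*k - sum((k // i) * i for i in 1..n),
--     # with the quotient sum evaluated in O(sqrt(|k|)) by hyperbola counting.
--     if n <= 0:
--         return n * k
--     if k >= 0:
--         return n * k - _qsum(n, k)
--     # k < 0: k // i == -((-k - 1) // i) - 1
--     return n * k + _qsum(n, -k - 1) + n * (n + 1) // 2
-- ===== Notes on version B (the rewrite author's own statement) =====
-- stated objective: alternative
-- what changed: Replaced A's while-loop that jumps block to block (right = k//(k//left)) subtracting each block's closed-form series by a Dirichlet-hyperbola double count: two bounded for-loops up to isqrt(k) summing triangular numbers, with negative k reduced to the nonnegative case via k//i == -((-k-1)//i) - 1.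
-- intended difference: For k <= -2 and n >= 2, A's block trick wrongly assumes k//i is constant on the whole range when k//1 <= 0 and returns an inflated value (e.g. modSum(3,-5)=15), while B returns the true value of sum(k % i for i in 1..n) (2 there), which is what the docstring specifies. — e.g. on modSum(3, -5): A returns 15, B returns 2
import Mathlib
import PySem

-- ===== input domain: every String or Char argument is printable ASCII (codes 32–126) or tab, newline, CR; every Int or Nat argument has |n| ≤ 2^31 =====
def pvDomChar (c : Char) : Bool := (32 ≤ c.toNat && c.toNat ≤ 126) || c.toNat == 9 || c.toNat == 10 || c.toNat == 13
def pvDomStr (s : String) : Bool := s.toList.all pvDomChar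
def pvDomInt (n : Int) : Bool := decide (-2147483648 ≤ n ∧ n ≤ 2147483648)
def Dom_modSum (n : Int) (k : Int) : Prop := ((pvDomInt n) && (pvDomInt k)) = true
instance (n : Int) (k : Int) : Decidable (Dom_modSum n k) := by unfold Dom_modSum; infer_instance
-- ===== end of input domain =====

-- B replaces A's block-jumping while-loop by a Dirichlet-hyperbola double count (two
-- for-loops up to isqrt(k)); for k ≤ -2, n ≥ 2 A's block trick returns a wrong value and
-- B returns the intended sum(k % i for i in 1..n).


-- ===== PORT A =====
-- A's local helper `min`
def pyminA (a b : Int) : Int := if a < b then a else b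

-- A's while-loop; `fuel` is only a termination device: left starts at 1 and strictly
-- increases each iteration, so fuel = n.toNat never cuts the loop short.
def modSumLoopA (fuel : Nat) (n k left res : Int) : Int :=
  match fuel with
  | 0 => res
  | f + 1 =>
    if left ≤ n then
      let h := PySem.Int.floordiv k left
      let right := if h > 0 then pyminA (PySem.Int.floordiv k h) n else n
      let w := right - left + 1
      let s := PySem.Int.floordiv ((left + right) * w) 2
      modSumLoopA f n k (right + 1) (res - h * s)
    else res

def modSum (n : Int) (k : Int) : Int := modSumLoopA n.toNat n k 1 (n * k)

-- ===== PORT B =====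
-- Source B's `while (s + 1) * (s + 1) <= K: s += 1`; fuel = K.toNat suffices (s + 1 ≤ K while
-- the condition holds)
def pvSqrt (fuel : Nat) (K s : Int) : Int :=
  match fuel with
  | 0 => s
  | f + 1 => if (s + 1) * (s + 1) ≤ K then pvSqrt f K (s + 1) else s

-- Source B's _qsum: the two bounded for-loops of the hyperbola count
def pvQsum (m K : Int) : Int :=
  let s := pvSqrt K.toNat K 0
  let t1 := (PySem.List.pyRange 1 (s + 1) 1).foldl
    (fun tot j =>
      tot + PySem.Int.floordiv
        (min m (PySem.Int.floordiv K j) * (min m (PySem.Int.floordiv K j) + 1)) 2) 0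
  (PySem.List.pyRange 1 (min m s + 1) 1).foldl
    (fun tot i => tot + i * (PySem.Int.floordiv K i - s)) t1

def modSum_alt (n : Int) (k : Int) : Int :=
  if n ≤ 0 then n * k
  else if 0 ≤ k then n * k - pvQsum n k
  else n * k + pvQsum n (-k - 1) + PySem.Int.floordiv (n * (n + 1)) 2

-- ===== PRECONDITION & SPEC =====
-- For k ≤ -2 and n ≥ 2, A's block trick wrongly assumes k//i is constant on the whole
-- range when k//1 ≤ 0 and returns an inflated value; B returns the true value of
-- sum(k % i for i in 1..n), which is what the docstring specifies.
def D_modSum (n : Int) (k : Int) : Prop := k ≤ -2 ∧ 2 ≤ n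
instance (n : Int) (k : Int) : Decidable (D_modSum n k) := by unfold D_modSum; infer_instance

def Spec_modSum (n : Int) (k : Int) (out : Int) : Prop := ¬ D_modSum n k → out = modSum_alt n k
instance (n : Int) (k : Int) (out : Int) : Decidable (Spec_modSum n k out) := by unfold Spec_modSum; infer_instance

def pvDiffWitness_modSum : Int × Int := (3, -5)
def pvDiffWitnessOut_modSum : Int × Int := (15, 2)

-- ===== CLAIM (what is proved, stated in full; the proofs are below) =====
def Claim_unchanged_modSum : Prop := ∀ (n : Int) (k : Int), Dom_modSum n k → Spec_modSum n k (modSum n k)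
def Claim_changed_modSum : Prop := Dom_modSum (pvDiffWitness_modSum.1) (pvDiffWitness_modSum.2) ∧ D_modSum (pvDiffWitness_modSum.1) (pvDiffWitness_modSum.2) ∧ modSum (pvDiffWitness_modSum.1) (pvDiffWitness_modSum.2) = pvDiffWitnessOut_modSum.1 ∧ modSum_alt (pvDiffWitness_modSum.1) (pvDiffWitness_modSum.2) = pvDiffWitnessOut_modSum.2 ∧ pvDiffWitnessOut_modSum.1 ≠ pvDiffWitnessOut_modSum.2
def Claim_exact_modSum : Prop := ∀ (n : Int) (k : Int), Dom_modSum n k → D_modSum n k → modSum n k ≠ modSum_alt n k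

-- ===== LEMMAS AND PROOFS =====

-- loop returns res once left > n
lemma loop_exit (f : Nat) (n k l r : Int) (h : n < l) : modSumLoopA f n k l r = r := by
  cases f <;> simp [modSumLoopA, not_le.mpr h]

-- k // 1 = k
lemma fd_one (k : Int) : PySem.Int.floordiv k 1 = k := by
  rw [PySem.Int.floordiv_eq_iff_of_pos (by omega)]; omega

-- generic foldl shape of B's loop
lemma foldl_sub_mul (c : Int → Int) : ∀ (L : List Int) (r : Int),
    L.foldl (fun r i => r - c i * i) r = r - (L.map (fun i => c i * i)).sum := by
  intro L
  induction L with
  | nil => simp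
  | cons x xs ih => intro r; simp [List.foldl_cons, ih]; ring

-- Gauss: twice the sum of pyRange a (a+m)
lemma two_sum_pyRange (a : Int) (m : Nat) :
    2 * (PySem.List.pyRange a (a + m) 1).sum = (2 * a + m - 1) * m := by
  induction m with
  | zero => simp [PySem.List.pyRange_one_eq_nil (le_refl a)]
  | succ m ih =>
    have h : (a : Int) ≤ a + m := by omega
    have : (a : Int) + (m + 1 : Nat) = (a + m) + 1 := by push_cast; ring
    rw [this, PySem.List.pyRange_one_succ_right h]
    simp only [List.sum_append, List.sum_cons, List.sum_nil]
    push_cast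
    push_cast at ih
    nlinarith [ih]

-- floordiv((l+r)*(r-l+1))/2 is exactly the sum of pyRange l (r+1)
lemma block_sum (l r : Int) (h : l ≤ r + 1) :
    PySem.Int.floordiv ((l + r) * (r - l + 1)) 2 = (PySem.List.pyRange l (r + 1) 1).sum := by
  have hm : r + 1 = l + ((r + 1 - l).toNat : Int) := by omega
  have h2s := two_sum_pyRange l (r + 1 - l).toNat
  have heq : (l + r) * (r - l + 1) = (2 * l + ((r + 1 - l).toNat : Int) - 1) * ((r + 1 - l).toNat : Int) := by
    rw [show l + r = 2 * l + ((r + 1 - l).toNat : Int) - 1 by omega,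
        show r - l + 1 = ((r + 1 - l).toNat : Int) by omega]
  rw [PySem.Int.floordiv_eq_iff_of_pos (by omega), hm, heq]
  constructor <;> linarith [h2s]

-- bracket consequences
lemma fd_const (k h l rt i : Int) (hl : 0 < l) (hh : 0 < h) (hhl : h = PySem.Int.floordiv k l)
    (hrt : rt ≤ PySem.Int.floordiv k h) (h1 : l ≤ i) (h2 : i ≤ rt) :
    PySem.Int.floordiv k i = h := by
  have hi : 0 < i := by omega
  have hkl : h * l ≤ k := (PySem.Int.le_floordiv_iff_mul_le hl).mp hhl.le
  have hik : i * h ≤ k := by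
    have : rt * h ≤ k := (PySem.Int.le_floordiv_iff_mul_le hh).mp hrt
    nlinarith
  have hk0 : 0 ≤ k := by nlinarith
  rw [PySem.Int.floordiv_eq_iff_of_pos hi]
  constructor
  · linarith [hik]
  · -- k < (h+1)*i : from k//i ≤ k//l = h (antitone) i.e. ¬ (h+1 ≤ k//i)
    by_contra hcon
    rw [not_lt] at hcon
    have : (h + 1) ≤ PySem.Int.floordiv k i := (PySem.Int.le_floordiv_iff_mul_le hi).mpr (by linarith)
    -- then (h+1)*l ≤ (h+1)*i ≤ k, contradicting h = k//l i.e. k < (h+1)*l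
    have hlt : k < (h + 1) * l := ((PySem.Int.floordiv_eq_iff_of_pos hl).mp hhl.symm).2
    nlinarith

lemma sum_map_mul (h : Int) : ∀ L : List Int, (List.map (fun i => h * i) L).sum = h * L.sum := by
  intro L
  induction L with
  | nil => simp
  | cons x xs ih => simp [ih]; ring

-- block foldl with constant quotient
lemma foldl_block (k h : Int) (L : List Int) (r : Int)
    (hc : ∀ i ∈ L, PySem.Int.floordiv k i = h) :
    L.foldl (fun r i => r - PySem.Int.floordiv k i * i) r = r - h * L.sum := by
  rw [foldl_sub_mul]
  have : L.map (fun i => PySem.Int.floordiv k i * i) = L.map (fun i => h * i) := by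
    apply List.map_congr_left
    intro i hi; rw [hc i hi]
  rw [this, sum_map_mul h L]

lemma loopA_inv (k : Int) (hk : 0 ≤ k) : ∀ (f : Nat) (n l r : Int), 1 ≤ l → (n + 1 - l).toNat ≤ f →
    modSumLoopA f n k l r
      = (PySem.List.pyRange l (n + 1) 1).foldl (fun r i => r - PySem.Int.floordiv k i * i) r := by
  intro f
  induction f with
  | zero =>
    intro n l r hl hf
    have : n < l := by omega
    rw [loop_exit _ _ _ _ _ this, PySem.List.pyRange_one_eq_nil (by omega)]
    rfl
  | succ f ih =>
    intro n l r hl hf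
    by_cases hln : l ≤ n
    · by_cases hpos : PySem.Int.floordiv k l > 0
      · simp only [modSumLoopA, if_pos hln, if_pos hpos]
        set h := PySem.Int.floordiv k l with hh
        set rt := pyminA (PySem.Int.floordiv k h) n with hrt
        -- rt bounds
        have hkl : h * l ≤ k := (PySem.Int.le_floordiv_iff_mul_le (by omega)).mp (le_refl h)
        have hlkh : l ≤ PySem.Int.floordiv k h := by
          rw [PySem.Int.le_floordiv_iff_mul_le hpos]; linarith
        have hrt1 : l ≤ rt := by
          rw [hrt]; unfold pyminA; split_ifs <;> omega
        have hrt2 : rt ≤ n := by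
          rw [hrt]; unfold pyminA; split_ifs <;> omega
        have hrt3 : rt ≤ PySem.Int.floordiv k h := by
          rw [hrt]; unfold pyminA; split_ifs <;> omega
        have hsplit : PySem.List.pyRange l (n + 1) 1
            = PySem.List.pyRange l (rt + 1) 1 ++ PySem.List.pyRange (rt + 1) (n + 1) 1 :=
          PySem.List.pyRange_one_append l (rt + 1) (n + 1) (by omega) (by omega)
        rw [hsplit, List.foldl_append]
        rw [foldl_block k h _ r (by
          intro i hi
          rw [PySem.List.mem_pyRange_one] at hi
          exact fd_const k h l rt i (by omega) hpos hh hrt3 hi.1 (by omega))]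
        rw [block_sum l rt (by omega)]
        exact ih n (rt + 1) _ (by omega) (by omega)
      · simp only [modSumLoopA, if_pos hln, if_neg hpos]
        have h0 : PySem.Int.floordiv k l = 0 := by
          have : 0 ≤ PySem.Int.floordiv k l := by
            rw [PySem.Int.le_floordiv_iff_mul_le (by omega)]; linarith
          omega
        have hkl : k < l := by
          by_contra hcon
          rw [not_lt] at hcon
          have : 1 ≤ PySem.Int.floordiv k l := by
            rw [PySem.Int.le_floordiv_iff_mul_le (by omega)]; linarith
          omega
        rw [h0, zero_mul, sub_zero, loop_exit _ _ _ _ _ (by omega)]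
        rw [foldl_block k 0 _ r (by
          intro i hi
          rw [PySem.List.mem_pyRange_one] at hi
          rw [PySem.Int.floordiv_eq_iff_of_pos (by omega)]
          constructor <;> nlinarith [hi.1, hi.2])]
        ring
    · rw [modSumLoopA, if_neg hln, PySem.List.pyRange_one_eq_nil (by omega)]
      rfl

-- one unfolding for k < 0, n ≥ 1: single block [1, n]
lemma loopA_neg (n k : Int) (hk : k < 0) (hn : 1 ≤ n) :
    modSum n k = n * k - k * PySem.Int.floordiv ((1 + n) * n) 2 := by
  unfold modSum
  obtain ⟨m, hm⟩ : ∃ m, n.toNat = m + 1 := ⟨n.toNat - 1, by omega⟩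
  rw [hm]
  simp only [modSumLoopA, if_pos hn, fd_one]
  rw [if_neg (by omega)]
  rw [loop_exit _ _ _ _ _ (by omega)]
  ring_nf

lemma fd_neg_one (i : Int) (hi : 1 ≤ i) : PySem.Int.floordiv (-1) i = -1 := by
  rw [PySem.Int.floordiv_eq_iff_of_pos (by omega)]
  constructor <;> omega


def triN (t : Nat) : Nat := t * (t + 1) / 2

lemma gauss_icc (t : Nat) : (∑ i ∈ Finset.Icc 1 t, i) = triN t := by
  have h1 : (∑ i ∈ Finset.Icc 1 t, i) * 2 = t * (t + 1) := by
    induction t with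
    | zero => simp
    | succ m ih => rw [Finset.sum_Icc_succ_top (by omega)]; ring_nf; ring_nf at ih; omega
  unfold triN
  omega

-- both hyperbola sums count Σ i over {(i,j) : i ≤ m, j ≤ K, i*j ≤ K}
lemma hyperNat (m K s : Nat) (h1 : s * s ≤ K) (h2 : K < (s + 1) * (s + 1)) :
    (∑ j ∈ Finset.Icc 1 s, triN (min m (K / j)))
      + (∑ i ∈ Finset.Icc 1 (min m s), i * (K / i - s))
      = ∑ i ∈ Finset.Icc 1 m, i * (K / i) := by
  have hsK : s ≤ K := by nlinarith
  have hdivs : K / (s + 1) ≤ s := by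
    have := Nat.div_lt_iff_lt_mul (by omega : 0 < s + 1) |>.mpr (by nlinarith : K < (s + 1) * (s + 1))
    omega
  -- RHS as a j-first double sum over the pairs under the hyperbola
  have stepA : (∑ i ∈ Finset.Icc 1 m, i * (K / i))
      = ∑ j ∈ Finset.Icc 1 K, ∑ i ∈ (Finset.Icc 1 m).filter (fun i => i * j ≤ K), i := by
    have e1 : ∀ i ∈ Finset.Icc 1 m, i * (K / i) = ∑ j ∈ Finset.Icc 1 (K / i), i := by
      intro i hi
      rw [Finset.sum_const, Nat.card_Icc, smul_eq_mul]
      simp [Nat.mul_comm]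
    rw [Finset.sum_congr rfl e1]
    refine Finset.sum_comm' ?_
    intro i j
    simp only [Finset.mem_Icc, Finset.mem_filter]
    constructor
    · rintro ⟨⟨hi1, hi2⟩, hj1, hj2⟩
      have hji : j * i ≤ K := (Nat.le_div_iff_mul_le (by omega : 0 < i)).mp hj2
      have hij : i * j ≤ K := by rw [Nat.mul_comm]; exact hji
      exact ⟨⟨⟨hi1, hi2⟩, hij⟩, hj1, le_trans (Nat.le_mul_of_pos_right j (by omega)) hji⟩
    · rintro ⟨⟨⟨hi1, hi2⟩, hij⟩, hj1, _⟩
      exact ⟨⟨hi1, hi2⟩, hj1, (Nat.le_div_iff_mul_le (by omega : 0 < i)).mpr (by rw [Nat.mul_comm]; exact hij)⟩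
  -- split the j-range at s
  have hdis : Disjoint (Finset.Icc 1 s) (Finset.Icc (s + 1) K) := by
    rw [Finset.disjoint_left]
    intro a ha hb
    simp only [Finset.mem_Icc] at ha hb
    omega
  have hun : Finset.Icc 1 K = Finset.Icc 1 s ∪ Finset.Icc (s + 1) K := by
    ext a
    simp only [Finset.mem_Icc, Finset.mem_union]
    omega
  -- low j: the inner sum is a triangular number
  have low : ∀ j ∈ Finset.Icc 1 s,
      (∑ i ∈ (Finset.Icc 1 m).filter (fun i => i * j ≤ K), i) = triN (min m (K / j)) := by
    intro j hj
    simp only [Finset.mem_Icc] at hj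
    have : (Finset.Icc 1 m).filter (fun i => i * j ≤ K) = Finset.Icc 1 (min m (K / j)) := by
      ext i
      simp only [Finset.mem_Icc, Finset.mem_filter]
      constructor
      · rintro ⟨⟨hi1, hi2⟩, hij⟩
        exact ⟨hi1, le_min hi2 ((Nat.le_div_iff_mul_le (by omega : 0 < j)).mpr hij)⟩
      · rintro ⟨hi1, hi2⟩
        have h3 := le_trans hi2 (min_le_right _ _)
        exact ⟨⟨hi1, le_trans hi2 (min_le_left _ _)⟩, (Nat.le_div_iff_mul_le (by omega : 0 < j)).mp h3⟩
    rw [this, ← gauss_icc]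
  -- high j: swap back and count the j-interval
  have high : (∑ j ∈ Finset.Icc (s + 1) K, ∑ i ∈ (Finset.Icc 1 m).filter (fun i => i * j ≤ K), i)
      = ∑ i ∈ Finset.Icc 1 (min m s), i * (K / i - s) := by
    have swap : (∑ j ∈ Finset.Icc (s + 1) K, ∑ i ∈ (Finset.Icc 1 m).filter (fun i => i * j ≤ K), i)
        = ∑ i ∈ Finset.Icc 1 (min m s), ∑ j ∈ Finset.Icc (s + 1) (K / i), i := by
      refine Finset.sum_comm' ?_
      intro j i
      simp only [Finset.mem_Icc, Finset.mem_filter]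
      constructor
      · rintro ⟨⟨hj1, hj2⟩, ⟨hi1, hi2⟩, hij⟩
        have his : i ≤ s := by
          have : i * (s + 1) ≤ K := le_trans (Nat.mul_le_mul_left i hj1) hij
          have := (Nat.le_div_iff_mul_le (by omega : 0 < s + 1)).mpr this
          omega
        have hjd : j ≤ K / i := (Nat.le_div_iff_mul_le (by omega : 0 < i)).mpr (by rw [Nat.mul_comm]; exact hij)
        exact ⟨⟨hj1, hjd⟩, hi1, le_min hi2 his⟩
      · rintro ⟨⟨hj1, hj2⟩, hi1, hi2⟩
        have hji : j * i ≤ K := (Nat.le_div_iff_mul_le (by omega : 0 < i)).mp hj2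
        have hij : i * j ≤ K := by rw [Nat.mul_comm]; exact hji
        exact ⟨⟨hj1, le_trans (Nat.le_mul_of_pos_right j (by omega)) hji⟩, ⟨hi1, le_trans hi2 (min_le_left _ _)⟩, hij⟩
    rw [swap]
    refine Finset.sum_congr rfl ?_
    intro i hi
    rw [Finset.sum_const, Nat.card_Icc, smul_eq_mul]
    have : K / i + 1 - (s + 1) = K / i - s := by omega
    rw [this, Nat.mul_comm]
  rw [stepA, hun, Finset.sum_union hdis, Finset.sum_congr rfl low, high]
lemma pvSqrt_spec : ∀ (fuel : Nat) (K s : Int), 0 ≤ s → s * s ≤ K → (K - s).toNat ≤ fuel →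
    0 ≤ pvSqrt fuel K s ∧ pvSqrt fuel K s * pvSqrt fuel K s ≤ K
      ∧ K < (pvSqrt fuel K s + 1) * (pvSqrt fuel K s + 1) := by
  intro fuel
  induction fuel with
  | zero =>
    intro K s hs0 hss hf
    have hKs : K ≤ s := by omega
    simp only [pvSqrt]
    refine ⟨hs0, hss, by nlinarith⟩
  | succ f ih =>
    intro K s hs0 hss hf
    rw [pvSqrt]
    by_cases hc : (s + 1) * (s + 1) ≤ K
    · rw [if_pos hc]
      have hs1K : s + 1 ≤ K := le_trans (by nlinarith) hc
      exact ih K (s + 1) (by omega) hc (by omega)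
    · rw [if_neg hc]
      exact ⟨hs0, hss, by omega⟩

def Sref (n k : Int) : Int :=
  ((PySem.List.pyRange 1 (n + 1) 1).map (fun i => PySem.Int.floordiv k i * i)).sum

lemma bridge (f : Int → Int) (m : Nat) :
    ((PySem.List.pyRange 1 ((m : Int) + 1) 1).map f).sum = ∑ i ∈ Finset.Icc 1 m, f (i : Int) := by
  induction m with
  | zero =>
    rw [show ((0:Nat):Int) + 1 = 1 by norm_num, PySem.List.pyRange_one_eq_nil (le_refl 1)]
    simp
  | succ p ih =>
    push_cast
    rw [PySem.List.pyRange_one_succ_right (by omega : (1:Int) ≤ (p:Int) + 1),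
        List.map_append, List.sum_append, ih, Finset.sum_Icc_succ_top (by omega : 1 ≤ p + 1)]
    push_cast
    simp

lemma qsum_eq (m K : Int) (hm : 1 ≤ m) (hK : 0 ≤ K) : pvQsum m K = Sref m K := by
  obtain ⟨hs0, hss, hlt⟩ := pvSqrt_spec K.toNat K 0 le_rfl (by omega) (by omega)
  have hm' : m = (m.toNat : Int) := by omega
  have hK' : K = (K.toNat : Int) := by omega
  have hs' : pvSqrt K.toNat K 0 = ((pvSqrt K.toNat K 0).toNat : Int) := by omega
  set sN := (pvSqrt K.toNat K 0).toNat with hsN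
  set mN := m.toNat with hmN
  set KN := K.toNat with hKN
  have hssN : sN * sN ≤ KN := by
    have : ((sN * sN : Nat) : Int) ≤ ((KN : Nat) : Int) := by push_cast; rw [← hs', ← hK']; exact hss
    exact_mod_cast this
  have hltN : KN < (sN + 1) * (sN + 1) := by
    have : ((KN : Nat) : Int) < (((sN + 1) * (sN + 1) : Nat) : Int) := by
      push_cast; rw [← hs', ← hK']; exact hlt
    exact_mod_cast this
  unfold pvQsum
  rw [PySem.List.foldl_add, PySem.List.foldl_add, zero_add]
  rw [hs', hm', hK']
  rw [show min ((mN : Int)) ((sN : Int)) = ((min mN sN : Nat) : Int) by rw [Nat.cast_min]]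
  rw [bridge, bridge]
  unfold Sref
  rw [bridge]
  -- pointwise conversion of the three sums to casts of ℕ sums
  have e1 : ∀ j ∈ Finset.Icc 1 sN,
      PySem.Int.floordiv
        (min (mN : Int) (PySem.Int.floordiv (KN : Int) (j : Int))
          * (min (mN : Int) (PySem.Int.floordiv (KN : Int) (j : Int)) + 1)) 2
        = ((triN (min mN (KN / j)) : Nat) : Int) := by
    intro j hj
    rw [PySem.Int.floordiv_natCast, ← Nat.cast_min]
    rw [show ((min mN (KN / j) : Nat) : Int) * (((min mN (KN / j) : Nat) : Int) + 1)
        = ((min mN (KN / j) * (min mN (KN / j) + 1) : Nat) : Int) by push_cast; ring]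
    unfold triN
    exact_mod_cast PySem.Int.floordiv_natCast (min mN (KN / j) * (min mN (KN / j) + 1)) 2
  have e2 : ∀ i ∈ Finset.Icc 1 (min mN sN),
      (i : Int) * (PySem.Int.floordiv (KN : Int) (i : Int) - (sN : Int))
        = ((i * (KN / i - sN) : Nat) : Int) := by
    intro i hi
    simp only [Finset.mem_Icc] at hi
    have hisN : i ≤ sN := le_trans hi.2 (min_le_right _ _)
    have hsle : sN ≤ KN / i := by
      have h1 : KN / sN ≤ KN / i := Nat.div_le_div_left hisN (by omega)
      have h2 : sN ≤ KN / sN := (Nat.le_div_iff_mul_le (by omega : 0 < sN)).mpr hssN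
      omega
    rw [PySem.Int.floordiv_natCast]
    push_cast [Nat.cast_sub hsle]
    ring
  have e3 : ∀ i ∈ Finset.Icc 1 mN,
      PySem.Int.floordiv (KN : Int) (i : Int) * (i : Int) = ((i * (KN / i) : Nat) : Int) := by
    intro i hi
    rw [PySem.Int.floordiv_natCast]
    push_cast
    ring
  rw [Finset.sum_congr rfl e1, Finset.sum_congr rfl e2, Finset.sum_congr rfl e3]
  rw [← Nat.cast_sum, ← Nat.cast_sum, ← Nat.cast_sum, ← Nat.cast_add]
  exact_mod_cast hyperNat mN KN sN hssN hltN

lemma fd_negify (k i : Int) (_hk : k < 0) (hi : 1 ≤ i) :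
    PySem.Int.floordiv k i = -(PySem.Int.floordiv (-k - 1) i) - 1 := by
  have hd := PySem.Int.floordiv_eq_iff_of_pos (by omega : (0:Int) < i) |>.mp
    (rfl : PySem.Int.floordiv (-k - 1) i = PySem.Int.floordiv (-k - 1) i)
  rw [PySem.Int.floordiv_eq_iff_of_pos (by omega : (0:Int) < i)]
  constructor <;> nlinarith [hd.1, hd.2]

lemma sum_map_negify (c : Int → Int) : ∀ (L : List Int),
    (L.map (fun i => (-(c i) - 1) * i)).sum = -((L.map (fun i => c i * i)).sum) - L.sum := by
  intro L
  induction L with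
  | nil => simp
  | cons x xs ih => simp [ih]; ring

lemma tri_eq_sum (n : Int) (hn : 1 ≤ n) :
    PySem.Int.floordiv (n * (n + 1)) 2 = (PySem.List.pyRange 1 (n + 1) 1).sum := by
  have h := block_sum 1 n (by omega)
  rw [show n - 1 + 1 = n by ring] at h
  rw [show n * (n + 1) = (1 + n) * n by ring]
  exact h

lemma B_char (n k : Int) : modSum_alt n k = n * k - Sref n k := by
  unfold modSum_alt
  by_cases hn : n ≤ 0
  · rw [if_pos hn]
    unfold Sref
    rw [PySem.List.pyRange_one_eq_nil (by omega)]
    simp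
  · rw [if_neg hn]
    by_cases hk : 0 ≤ k
    · rw [if_pos hk, qsum_eq n k (by omega) hk]
    · rw [if_neg hk, qsum_eq n (-k - 1) (by omega) (by omega)]
      have hmap : (PySem.List.pyRange 1 (n + 1) 1).map (fun i => PySem.Int.floordiv k i * i)
          = (PySem.List.pyRange 1 (n + 1) 1).map
              (fun i => (-(PySem.Int.floordiv (-k - 1) i) - 1) * i) := by
        apply List.map_congr_left
        intro i hi
        rw [PySem.List.mem_pyRange_one] at hi
        rw [fd_negify k i (by omega) hi.1]
      have : Sref n k = -(Sref n (-k - 1)) - (PySem.List.pyRange 1 (n + 1) 1).sum := by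
        unfold Sref
        rw [hmap, sum_map_negify]
      rw [this, tri_eq_sum n (by omega)]
      ring

lemma A_char (n k : Int) (hk : 0 ≤ k) : modSum n k = n * k - Sref n k := by
  unfold modSum
  rw [loopA_inv k hk n.toNat n 1 (n * k) (by omega) (by omega)]
  unfold Sref
  exact foldl_sub_mul _ _ _

lemma unchanged_main (n k : Int) (hD : ¬ (k ≤ -2 ∧ 2 ≤ n)) : modSum n k = modSum_alt n k := by
  rcases Int.lt_or_le k 0 with hk | hk
  case inr => rw [A_char n k hk, B_char]
  rcases Int.lt_or_le 0 n with hn | hn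
  case inr =>
    rw [B_char]
    unfold modSum Sref
    rw [show n.toNat = 0 by omega, PySem.List.pyRange_one_eq_nil (by omega)]
    simp [modSumLoopA]
  -- n ≥ 1, k < 0, and ¬(k ≤ -2 ∧ 2 ≤ n): so n = 1 or k = -1
  rcases (by omega : n = 1 ∨ k = -1) with hn1 | hk1
  · subst hn1
    rw [loopA_neg _ _ hk (by omega), B_char]
    unfold Sref
    rw [show PySem.List.pyRange 1 (1 + 1) 1 = [1] from PySem.List.pyRange_one_singleton 1]
    rw [show PySem.Int.floordiv ((1 + 1) * 1) 2 = 1 by decide]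
    simp
  · subst hk1
    rw [loopA_neg _ _ hk hn, B_char]
    have hS : PySem.Int.floordiv ((1 + n) * n) 2 = (PySem.List.pyRange 1 (n + 1) 1).sum := by
      rw [show (1 + n) * n = n * (n + 1) by ring]
      exact tri_eq_sum n (by omega)
    rw [hS]
    unfold Sref
    have hmap : (PySem.List.pyRange 1 (n + 1) 1).map (fun i => PySem.Int.floordiv (-1) i * i)
        = (PySem.List.pyRange 1 (n + 1) 1).map (fun i => (-1) * i) := by
      apply List.map_congr_left
      intro i hi
      rw [PySem.List.mem_pyRange_one] at hi
      rw [fd_neg_one i hi.1]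
    rw [hmap, sum_map_mul]

lemma tight_main (n k : Int) (hk2 : k ≤ -2) (hn2 : 2 ≤ n) : modSum n k ≠ modSum_alt n k := by
  rw [loopA_neg _ _ (by omega) (by omega), B_char]
  have hS : PySem.Int.floordiv ((1 + n) * n) 2 = (PySem.List.pyRange 1 (n + 1) 1).sum := by
    rw [show (1 + n) * n = n * (n + 1) by ring]
    exact tri_eq_sum n (by omega)
  rw [hS]
  unfold Sref
  set L := PySem.List.pyRange 1 (n + 1) 1 with hL
  have hkS : k * L.sum = (L.map (fun i => k * i)).sum := (sum_map_mul k L).symm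
  have hsplit : L = PySem.List.pyRange 1 3 1 ++ PySem.List.pyRange 3 (n + 1) 1 :=
    PySem.List.pyRange_one_append 1 3 (n + 1) (by omega) (by omega)
  have h12 : PySem.List.pyRange 1 3 1 = [1, 2] := by decide
  have hrest : ((PySem.List.pyRange 3 (n + 1) 1).map (fun i => k * i)).sum
      ≤ ((PySem.List.pyRange 3 (n + 1) 1).map (fun i => PySem.Int.floordiv k i * i)).sum := by
    apply List.sum_le_sum
    intro i hi
    rw [PySem.List.mem_pyRange_one] at hi
    have hki : k ≤ PySem.Int.floordiv k i := by
      rw [PySem.Int.le_floordiv_iff_mul_le (by omega)]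
      nlinarith [hi.1]
    exact mul_le_mul_of_nonneg_right hki (by omega)
  have h2 : k + 1 ≤ PySem.Int.floordiv k 2 := by
    rw [PySem.Int.le_floordiv_iff_mul_le (by omega)]
    omega
  have hf1 : PySem.Int.floordiv k 1 * 1 = k := by rw [fd_one]; ring
  have hlt : (L.map (fun i => k * i)).sum < (L.map (fun i => PySem.Int.floordiv k i * i)).sum := by
    rw [hsplit, List.map_append, List.map_append, List.sum_append, List.sum_append, h12]
    simp only [List.map_cons, List.map_nil, List.sum_cons, List.sum_nil]
    rw [hf1]
    nlinarith [hrest, h2]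
  intro hcon
  rw [hkS] at hcon
  omega

-- ===== VERDICT (by name: the statement is the Claim_ definition above) =====
theorem modSum_spec : Claim_unchanged_modSum := by
  intro n k _ hD
  exact unchanged_main n k hD
theorem modSum_changed : Claim_changed_modSum := by unfold Claim_changed_modSum; decide
theorem modSum_tight : Claim_exact_modSum := by
  intro n k _ hD
  obtain ⟨h1, h2⟩ := hD
  exact tight_main n k h1 h2
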